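-- pv_equiv track=rewrite | github.com/ladokp/aoc2023 | solution/aoc_day_14.py | spin_east
-- ===== SOURCE A (Python) =====
-- def spin_east(data, m, n):
--     new_data = [["."] * n for _ in range(m)]
--     for i in range(m):
--         to_place = n - 1
--         for j in reversed(range(n)):
--             if data[i][j] == "#":
--                 new_data[i][j] = "#"
--                 to_place = j - 1
--             elif data[i][j] == "O":
--                 new_data[i][to_place] = "O"
--                 to_place -= 1
--     return new_data
-- ===== SOURCE B (Python) =====
-- def spin_east(data, m, n):
--     result = []
--     for i in range(m):
--         out = []
--         empties = 0
--         rocks = 0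
--         for j in range(n):
--             c = data[i][j]
--             if c == "#":
--                 out.extend(["."] * empties + ["O"] * rocks + ["#"])
--                 empties = 0
--                 rocks = 0
--             elif c == "O":
--                 rocks += 1
--             else:
--                 empties += 1
--         out.extend(["."] * empties + ["O"] * rocks)
--         result.append(out)
--     return result
-- ===== Notes on version B (the rewrite author's own statement) =====
-- stated objective: idiomatic
-- what changed: B replaces A's reverse index scan that mutates a pre-built grid through a to_place cursor with a single forward pass per row that counts empties and rocks in each wall-delimited segment and emits the '.'s then the 'O's directly.
import Mathlib
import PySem

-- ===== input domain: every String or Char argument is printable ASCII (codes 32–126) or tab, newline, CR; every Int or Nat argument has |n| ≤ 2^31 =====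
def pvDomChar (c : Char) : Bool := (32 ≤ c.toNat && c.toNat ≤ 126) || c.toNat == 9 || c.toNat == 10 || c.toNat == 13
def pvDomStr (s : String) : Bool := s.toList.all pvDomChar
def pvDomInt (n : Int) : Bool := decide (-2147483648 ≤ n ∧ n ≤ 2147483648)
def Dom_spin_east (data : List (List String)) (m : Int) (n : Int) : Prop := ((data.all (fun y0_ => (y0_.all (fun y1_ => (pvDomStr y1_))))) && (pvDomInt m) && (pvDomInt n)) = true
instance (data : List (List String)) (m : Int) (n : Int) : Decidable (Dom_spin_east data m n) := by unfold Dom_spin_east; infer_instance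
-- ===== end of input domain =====

-- B builds each row in one forward pass, counting empties and rocks per wall-delimited
-- segment and emitting the '.'s then the 'O's, instead of A's reverse index scan that
-- mutates a pre-built grid through a `to_place` cursor (idiomatic; same cost).

-- ===== PORT A =====
-- one step of A's inner loop over j = n-1 … 0: state is (new_data[i], to_place)
def spinEastStepA (row : List String) (st : List String × Int) (j : Int) : List String × Int :=
  if PySem.List.pyGetD row j "" == "#" then
    (PySem.List.pySetD st.1 j "#", j - 1)
  else if PySem.List.pyGetD row j "" == "O" then
    (PySem.List.pySetD st.1 st.2 "O", st.2 - 1)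
  else st

-- A's body for row i: new_data[i] starts as ["."]*n, then the reversed(range(n)) loop
def spinEastRowA (row : List String) (n : Int) : List String :=
  (((PySem.List.pyRange 0 n 1).reverse).foldl (spinEastStepA row)
    (List.replicate n.toNat ".", n - 1)).1

def spin_east (data : List (List String)) (m : Int) (n : Int) : List (List String) :=
  (PySem.List.pyRange 0 m 1).map (fun i => spinEastRowA (PySem.List.pyGetD data i []) n)

-- ===== PORT B =====
-- one step of B's inner loop: state is (out, empties, rocks)
def spinEastStepB (st : List String × Int × Int) (c : String) : List String × Int × Int :=
  if c == "#" then
    (st.1 ++ (List.replicate st.2.1.toNat "." ++ List.replicate st.2.2.toNat "O" ++ ["#"]), 0, 0)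
  else if c == "O" then (st.1, st.2.1, st.2.2 + 1)
  else (st.1, st.2.1 + 1, st.2.2)

def spinEastRowB (row : List String) (n : Int) : List String :=
  let st := (PySem.List.pyRange 0 n 1).foldl
    (fun st j => spinEastStepB st (PySem.List.pyGetD row j "")) ([], 0, 0)
  st.1 ++ (List.replicate st.2.1.toNat "." ++ List.replicate st.2.2.toNat "O")

def spin_east_alt (data : List (List String)) (m : Int) (n : Int) : List (List String) :=
  (PySem.List.pyRange 0 m 1).map (fun i => spinEastRowB (PySem.List.pyGetD data i []) n)

-- ===== PRECONDITION & SPEC =====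
-- Pre_ excludes exactly the inputs where the Python raises IndexError: when both loops
-- actually run (0 < m, 0 < n), data must have at least m rows and each of the first m
-- rows at least n cells.
def Pre_spin_east (data : List (List String)) (m : Int) (n : Int) : Prop :=
  0 < m → 0 < n → m ≤ (data.length : Int) ∧ ∀ row ∈ data.take m.toNat, n ≤ (row.length : Int)
instance (data : List (List String)) (m : Int) (n : Int) : Decidable (Pre_spin_east data m n) := by
  unfold Pre_spin_east; infer_instance

def pvWitness_spin_east : List (List String) × Int × Int :=
  ([["O", ".", "#", ".", "O", "O"], [".", "O", "x", "#", ".", "O"]], 2, 6)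

def Spec_spin_east (data : List (List String)) (m : Int) (n : Int) (out : List (List String)) : Prop := out = spin_east_alt data m n
instance (data : List (List String)) (m : Int) (n : Int) (out : List (List String)) : Decidable (Spec_spin_east data m n out) := by unfold Spec_spin_east; infer_instance

-- ===== CLAIM (what is proved, stated in full; the proofs are below) =====
def Claim_equal_spin_east : Prop := ∀ (data : List (List String)) (m : Int) (n : Int), Dom_spin_east data m n → Pre_spin_east data m n → Spec_spin_east data m n (spin_east data m n)

-- ===== LEMMAS AND PROOFS =====

-- A's inner loop re-expressed on the reversed list of cell values: the head of the first
-- argument is the cell currently at index r.length.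
def runAr : List String → List String → Int → List String
  | [], g, _ => g
  | c :: r, g, tp =>
    if c == "#" then runAr r (PySem.List.pySetD g (r.length : Int) "#") ((r.length : Int) - 1)
    else if c == "O" then runAr r (PySem.List.pySetD g tp "O") (tp - 1)
    else runAr r g tp

-- B's whole-row machine on a plain list of cell values
def btrans (cells : List String) : List String :=
  let st := cells.foldl spinEastStepB ([], 0, 0)
  st.1 ++ (List.replicate st.2.1.toNat "." ++ List.replicate st.2.2.toNat "O")

theorem stepB_dots (d : Nat) : ∀ (out : List String) (e r : Int),
    (List.replicate d ".").foldl spinEastStepB (out, e, r) = (out, e + d, r) := by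
  induction d with
  | zero => intro out e r; simp
  | succ d ih =>
    intro out e r
    rw [List.replicate_succ]
    simp only [List.foldl_cons, spinEastStepB]
    norm_num
    rw [ih]
    simp only [Prod.mk.injEq]
    refine ⟨rfl, by push_cast; ring, rfl⟩

theorem stepB_nonneg (u : List String) : ∀ (out : List String) (e r : Int), 0 ≤ e → 0 ≤ r →
    0 ≤ (u.foldl spinEastStepB (out, e, r)).2.1 ∧ 0 ≤ (u.foldl spinEastStepB (out, e, r)).2.2 := by
  induction u with
  | nil => intro out e r he hr; simpa using ⟨he, hr⟩
  | cons c u ih =>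
    intro out e r he hr
    simp only [List.foldl_cons, spinEastStepB]
    split_ifs <;> exact ih _ _ _ (by omega) (by omega)

theorem btrans_sharp (u : List String) (d : Nat) :
    btrans (u ++ "#" :: List.replicate d ".") = btrans u ++ "#" :: List.replicate d "." := by
  unfold btrans
  rcases hst : u.foldl spinEastStepB ([], 0, 0) with ⟨out, e, r⟩
  rw [show ("#" :: List.replicate d (".":String)) = ["#"] ++ List.replicate d "." from rfl,
      ← List.append_assoc, List.foldl_append, List.foldl_append, hst]
  simp only [List.foldl_cons, List.foldl_nil, spinEastStepB, beq_self_eq_true, if_true]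
  rw [stepB_dots]
  simp

theorem btrans_O (u : List String) (d : Nat) :
    btrans (u ++ "O" :: List.replicate d ".") = btrans (u ++ List.replicate d ".") ++ ["O"] := by
  unfold btrans
  rcases hst : u.foldl spinEastStepB ([], 0, 0) with ⟨out, e, r⟩
  have hr : 0 ≤ r := by
    have := (stepB_nonneg u [] 0 0 le_rfl le_rfl).2; rw [hst] at this; exact this
  rw [show ("O" :: List.replicate d (".":String)) = ["O"] ++ List.replicate d "." from rfl,
      ← List.append_assoc, List.foldl_append, List.foldl_append, List.foldl_append, hst]
  simp only [List.foldl_cons, List.foldl_nil, spinEastStepB]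
  rw [if_neg (show ¬((("O":String) == "#") = true) from by decide),
      if_pos (show (("O":String) == "O") = true from by decide)]
  rw [stepB_dots, stepB_dots]
  simp only
  rw [show (r + 1).toNat = r.toNat + 1 from by omega, List.replicate_succ']
  simp

theorem btrans_other (u : List String) (c : String) (d : Nat)
    (h1 : ¬ c == "#") (h2 : ¬ c == "O") :
    btrans (u ++ c :: List.replicate d ".") = btrans (u ++ List.replicate (d + 1) ".") := by
  unfold btrans
  rcases hst : u.foldl spinEastStepB ([], 0, 0) with ⟨out, e, r⟩
  rw [show (c :: List.replicate d (".":String)) = [c] ++ List.replicate d "." from rfl,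
      ← List.append_assoc, List.foldl_append, List.foldl_append, List.foldl_append, hst]
  simp only [List.foldl_cons, List.foldl_nil, spinEastStepB, h1, h2, Bool.false_eq_true]
  rw [stepB_dots, stepB_dots]
  norm_num
  omega

theorem set_replicate_mid (k d : Nat) (done : List String) :
    (List.replicate (k + 1 + d) ("." : String) ++ done).set k "#"
      = List.replicate k "." ++ "#" :: (List.replicate d "." ++ done) := by
  have h : (k + 1 + d) = k + (1 + d) := by omega
  rw [h, List.replicate_add, List.append_assoc, List.set_append_right _ _ (by simp)]
  simp [List.replicate_add, List.replicate_succ]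

theorem set_replicate_end (k : Nat) (done : List String) :
    (List.replicate (k + 1) ("." : String) ++ done).set k "O"
      = List.replicate k "." ++ "O" :: done := by
  rw [List.replicate_succ', List.append_assoc, List.set_append_right _ _ (by simp)]
  simp

-- the key invariant: A's reverse run over u, on a grid whose first u.length + d cells are
-- still "." (d free slots remaining in the current segment) followed by finished content,
-- yields B's transform of u extended by d empties, followed by the finished content.
theorem main_inv (u : List String) : ∀ (d : Nat) (done : List String),
    runAr u.reverse (List.replicate (u.length + d) "." ++ done) ((u.length : Int) + d - 1)
      = btrans (u ++ List.replicate d ".") ++ done := by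
  induction u using List.reverseRecOn with
  | nil =>
    intro d done
    simp [runAr, btrans, stepB_dots d [] 0 0]
  | append_singleton u' c ih =>
    intro d done
    rw [List.reverse_append]
    simp only [List.reverse_cons, List.reverse_nil, List.nil_append, List.singleton_append]
    by_cases hsharp : c == "#"
    · -- wall: written at its own index, to_place resets to the left of it
      rw [show c = "#" from by simpa using hsharp]
      simp only [runAr, beq_self_eq_true, if_true, List.length_reverse,
        List.length_append, List.length_cons, List.length_nil]
      rw [PySem.List.pySetD_natCast]
      rw [show u'.length + (0+1) + d = u'.length + 1 + d from by omega]
      rw [set_replicate_mid]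
      have h0 := ih 0 ("#" :: (List.replicate d "." ++ done))
      simp only [Nat.cast_zero, add_zero] at h0
      rw [h0]
      rw [List.append_assoc u' ["#"], List.singleton_append, btrans_sharp]
      simp
    · by_cases hO : c == "O"
      · -- rock: written at to_place, the rightmost free slot
        rw [show c = "O" from by simpa using hO]
        simp only [runAr, List.length_append, List.length_cons, List.length_nil]
        rw [if_neg (show ¬((("O":String) == "#") = true) from by decide),
            if_pos (show (("O":String) == "O") = true from by decide)]
        rw [show ((u'.length + (0+1) : Nat) : Int) + (d : Int) - 1 = ((u'.length + d : Nat) : Int) from by push_cast; ring]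
        rw [PySem.List.pySetD_natCast]
        rw [show u'.length + (0+1) + d = (u'.length + d) + 1 from by omega]
        rw [set_replicate_end]
        have h0 := ih d ("O" :: done)
        rw [show ((u'.length + d : Nat) : Int) - 1 = (u'.length : Int) + (d : Int) - 1 from by push_cast; ring]
        rw [h0]
        rw [List.append_assoc u' ["O"], List.singleton_append, btrans_O]
        simp
      · -- anything else counts as an empty slot
        simp only [runAr, List.length_append, List.length_cons, List.length_nil]
        rw [if_neg hsharp, if_neg hO]
        have h0 := ih (d + 1) done
        rw [show u'.length + (0+1) + d = u'.length + (d + 1) from by omega]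
        rw [show ((u'.length + (0+1) : Nat) : Int) + (d : Int) - 1 = (u'.length : Int) + ((d : Nat) + 1 : Nat) - 1 from by push_cast; ring]
        rw [h0]
        rw [List.append_assoc u' [c], List.singleton_append, btrans_other u' c d hsharp hO]

-- A's inner foldl over reversed indices is runAr on the reversed list of cell values
theorem bridgeA (row : List String) : ∀ (k : Nat) (g : List String) (tp : Int),
    ((((List.range k).map (fun j : Nat => (j : Int))).reverse).foldl (spinEastStepA row) (g, tp)).1
      = runAr (((List.range k).map (fun j : Nat => PySem.List.pyGetD row (j : Int) "")).reverse) g tp := by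
  intro k
  induction k with
  | zero => intro g tp; simp [runAr]
  | succ k ih =>
    intro g tp
    rw [List.range_succ]
    simp only [List.map_append, List.reverse_append, List.map_cons, List.map_nil,
      List.reverse_cons, List.reverse_nil, List.nil_append, List.singleton_append,
      List.foldl_cons]
    by_cases h1 : (PySem.List.pyGetD row (k : Int) "" == "#")
    · simp only [runAr, spinEastStepA, h1, if_true, List.length_reverse, List.length_map,
        List.length_range]
      exact ih _ _
    · by_cases h2 : (PySem.List.pyGetD row (k : Int) "" == "O")
      · simp only [runAr, spinEastStepA, h1, h2, Bool.false_eq_true, if_false, if_true]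
        exact ih _ _
      · simp only [runAr, spinEastStepA, h1, h2, Bool.false_eq_true, if_false]
        exact ih _ _

-- per-row equality of the two ports
theorem row_eq (row : List String) (n : Int) : spinEastRowA row n = spinEastRowB row n := by
  unfold spinEastRowA spinEastRowB
  rw [PySem.List.pyRange_one]
  simp only [Int.sub_zero, zero_add]
  by_cases hn : 0 ≤ n
  · rw [bridgeA row n.toNat]
    rw [List.foldl_map]
    have hmain := main_inv ((List.range n.toNat).map (fun j : Nat => PySem.List.pyGetD row (j : Int) "")) 0 []
    simp only [List.length_map, List.length_range, Nat.cast_zero, add_zero,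
      List.append_nil, List.replicate_zero] at hmain
    rw [show (n : Int) - 1 = ((n.toNat : Int)) - 1 from by omega]
    rw [hmain]
    unfold btrans
    rw [List.foldl_map]
  · have h0 : n.toNat = 0 := by omega
    rw [h0]
    simp

-- ===== VERDICT (by name: the statement is the Claim_ definition above) =====
theorem spin_east_spec : Claim_equal_spin_east := by
  intro data m n _ _
  unfold Spec_spin_east spin_east spin_east_alt
  simp only [row_eq]
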